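-- pv_equiv track=rewrite | github.com/JankoWilliam/pyTest | python/baiduAddress/GaoDeAddressCalculate.py | gaode_geocodes_choose_best
-- ===== SOURCE A (Python) =====
-- def gaode_geocodes_choose_best(address, json_data):
--     result = None
--     for geocode in json_data['geocodes']:
--         if len(geocode['formatted_address']) > 5:  # 数据返回地点长度大于5
--             # if address in geocode['formatted_address'] or geocode['formatted_address'] in address:  # 数据返回公司名称要么全量包含待获取公司名称或被全量包含
--             result = geocode
--             if address == geocode['formatted_address']:
--                 break
--     return result
-- ===== SOURCE B (Python) =====
-- def gaode_geocodes_choose_best(address, json_data):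
--     # build the filtered list of qualifying geocodes once
--     qualifying = [g for g in json_data['geocodes'] if len(g['formatted_address']) > 5]
--     # exact match wins
--     for g in qualifying:
--         if address == g['formatted_address']:
--             return g
--     # otherwise the last qualifying entry, None if there is none
--     return qualifying[-1] if qualifying else None
-- ===== Notes on version B (the rewrite author's own statement) =====
-- stated objective: alternative
-- what changed: A's single interleaved pass with a running 'result' accumulator and a break is replaced by a two-phase algorithm: first materialise the filtered list of qualifying geocodes, then search it for an exact match and otherwise take its last element via qualifying[-1].
import Mathlib
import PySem

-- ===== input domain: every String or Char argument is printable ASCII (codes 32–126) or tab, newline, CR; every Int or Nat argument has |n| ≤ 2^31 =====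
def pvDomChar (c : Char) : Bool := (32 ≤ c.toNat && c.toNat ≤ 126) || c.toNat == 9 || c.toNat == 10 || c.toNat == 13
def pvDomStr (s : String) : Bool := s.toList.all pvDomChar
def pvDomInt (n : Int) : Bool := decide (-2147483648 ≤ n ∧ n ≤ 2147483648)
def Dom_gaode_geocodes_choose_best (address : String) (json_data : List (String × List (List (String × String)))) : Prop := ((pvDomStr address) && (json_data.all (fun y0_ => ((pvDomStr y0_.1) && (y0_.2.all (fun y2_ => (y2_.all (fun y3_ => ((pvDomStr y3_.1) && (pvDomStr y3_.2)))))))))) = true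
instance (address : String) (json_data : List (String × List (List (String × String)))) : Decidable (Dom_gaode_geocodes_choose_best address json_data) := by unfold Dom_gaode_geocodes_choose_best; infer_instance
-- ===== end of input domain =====

-- B builds the filtered list of qualifying geocodes once, then searches it for an exact match
-- and otherwise takes its last element (qualifying[-1]): a staged, accumulator-free decomposition
-- of A's single interleaved pass; same cost. Pre_ excludes inputs where either Python raises KeyError.


-- ===== PORT A =====
-- the for-loop: 'result' accumulator, break (= immediate return of result) on exact match;
-- a missing 'formatted_address' key is Python's KeyError (outside Pre_), rendered as none here
def pvALoop (address : String) :
    List (List (String × String)) → Option (List (String × String)) → Option (List (String × String))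
  | [], result => result
  | g :: rest, result =>
    match (PySem.Dict.mk g).get? "formatted_address" with
    | none => none  -- KeyError (outside Pre_)
    | some fa =>
      if 5 < PySem.Str.len fa then
        if address = fa then some g  -- result = geocode; break
        else pvALoop address rest (some g)
      else pvALoop address rest result

def gaode_geocodes_choose_best (address : String) (json_data : List (String × List (List (String × String)))) : Option (List (String × String)) :=
  match (PySem.Dict.mk json_data).get? "geocodes" with
  | none => none  -- KeyError (outside Pre_)
  | some gs => pvALoop address gs none

-- ===== PORT B =====
-- the comprehension of Source B: the filtered list of qualifying geocodes
-- (a missing 'formatted_address' key is KeyError, outside Pre_, rendered as none)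
def pvQualify : List (List (String × String)) → Option (List (List (String × String)))
  | [] => some []
  | g :: rest =>
    match (PySem.Dict.mk g).get? "formatted_address" with
    | none => none  -- KeyError (outside Pre_)
    | some fa =>
      match pvQualify rest with
      | none => none
      | some q => some (if 5 < PySem.Str.len fa then g :: q else q)

-- the search loop of Source B over the qualifying list: first exact match
def pvScan (address : String) :
    List (List (String × String)) → Option (List (String × String))
  | [] => none
  | g :: rest =>
    match (PySem.Dict.mk g).get? "formatted_address" with
    | none => none  -- KeyError (unreachable on qualifying entries, outside Pre_)
    | some fa => if address = fa then some g else pvScan address rest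

def gaode_geocodes_choose_best_alt (address : String) (json_data : List (String × List (List (String × String)))) : Option (List (String × String)) :=
  match (PySem.Dict.mk json_data).get? "geocodes" with
  | none => none  -- KeyError (outside Pre_)
  | some gs =>
    match pvQualify gs with
    | none => none  -- KeyError (outside Pre_)
    | some qualifying =>
      match pvScan address qualifying with
      | some g => some g
      | none => if qualifying.isEmpty then none else PySem.List.pyGet? qualifying (-1)

-- ===== PRECONDITION & SPEC =====
-- geocode g carries the 'formatted_address' key
def pvHasKey (g : List (String × String)) : Bool :=
  ((PySem.Dict.mk g).get? "formatted_address").isSome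

-- Pre_ requires the 'geocodes' key and 'formatted_address' on EVERY geocode; this excludes some
-- inputs A returns on: A stops reading at an exact-match break, so it can return on lists with a
-- keyless entry after the break, where B's whole-list filter raises KeyError.
def Pre_gaode_geocodes_choose_best (address : String) (json_data : List (String × List (List (String × String)))) : Prop :=
  ((PySem.Dict.mk json_data).get? "geocodes").isSome = true ∧
  (((PySem.Dict.mk json_data).get? "geocodes").getD []).all pvHasKey = true

instance (address : String) (json_data : List (String × List (List (String × String)))) : Decidable (Pre_gaode_geocodes_choose_best address json_data) := by
  unfold Pre_gaode_geocodes_choose_best; infer_instance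

def pvWitness_gaode_geocodes_choose_best : String × (List (String × List (List (String × String)))) :=
  ("abcdef", [("geocodes", [[("formatted_address", "xyzxyz")], [("formatted_address", "abc")]])])

def Spec_gaode_geocodes_choose_best (address : String) (json_data : List (String × List (List (String × String)))) (out : Option (List (String × String))) : Prop := out = gaode_geocodes_choose_best_alt address json_data
instance (address : String) (json_data : List (String × List (List (String × String)))) (out : Option (List (String × String))) : Decidable (Spec_gaode_geocodes_choose_best address json_data out) := by unfold Spec_gaode_geocodes_choose_best; infer_instance

-- ===== CLAIM (what is proved, stated in full; the proofs are below) =====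
def Claim_equal_gaode_geocodes_choose_best : Prop := ∀ (address : String) (json_data : List (String × List (List (String × String)))), Dom_gaode_geocodes_choose_best address json_data → Pre_gaode_geocodes_choose_best address json_data → Spec_gaode_geocodes_choose_best address json_data (gaode_geocodes_choose_best address json_data)

-- ===== LEMMAS AND PROOFS =====

-- A's loop on an all-keyed list equals B's two phases over the qualifying list,
-- with the loop's seed 'result' as final fallback.
theorem pvALoop_eq (address : String) :
    ∀ (gs : List (List (String × String))) (result : Option (List (String × String))),
      gs.all pvHasKey = true →
      ∃ q, pvQualify gs = some q ∧
        pvALoop address gs result =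
          (match pvScan address q with
           | some g => some g
           | none =>
             match q.getLast? with
             | some g => some g
             | none => result) := by
  intro gs
  induction gs with
  | nil => intro result _; exact ⟨[], rfl, rfl⟩
  | cons g rest ih =>
    intro result hall
    rw [List.all_cons, Bool.and_eq_true_iff] at hall
    obtain ⟨hk, hrest⟩ := hall
    cases hfa : (PySem.Dict.mk g).get? "formatted_address" with
    | none => rw [pvHasKey, hfa] at hk; exact absurd hk (by simp)
    | some fa =>
      by_cases hq : 5 < PySem.Str.len fa
      · by_cases he : address = fa
        · -- break: A returns some g; B's scan hits g first
          obtain ⟨q, hqual, _⟩ := ih result hrest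
          refine ⟨g :: q, ?_, ?_⟩
          · simp only [pvQualify, hfa, hqual, if_pos hq]
          · simp only [pvALoop, pvScan, hfa, if_pos hq, if_pos he]
        · obtain ⟨q, hqual, hloop⟩ := ih (some g) hrest
          refine ⟨g :: q, ?_, ?_⟩
          · simp only [pvQualify, hfa, hqual, if_pos hq]
          · simp only [pvALoop, pvScan, hfa, if_pos hq, if_neg he]
            rw [hloop]
            cases pvScan address q with
            | some h => rfl
            | none =>
              cases hl : q.getLast? with
              | some h => simp [List.getLast?_cons, hl]
              | none =>
                have : q = [] := by
                  cases q with
                  | nil => rfl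
                  | cons a l => exact absurd hl (by simp [List.getLast?_cons])
                subst this; rfl
      · obtain ⟨q, hqual, hloop⟩ := ih result hrest
        refine ⟨q, ?_, ?_⟩
        · simp only [pvQualify, hfa, hqual, if_neg hq]
        · simp only [pvALoop, hfa, if_neg hq]
          exact hloop

-- ===== VERDICT (by name: the statement is the Claim_ definition above) =====
theorem gaode_geocodes_choose_best_spec : Claim_equal_gaode_geocodes_choose_best := by
  intro address json_data _ hpre
  unfold Spec_gaode_geocodes_choose_best
  obtain ⟨hsome, hall⟩ := hpre
  unfold gaode_geocodes_choose_best gaode_geocodes_choose_best_alt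
  cases hk : (PySem.Dict.mk json_data).get? "geocodes" with
  | none => rfl
  | some gs =>
    rw [hk, Option.getD_some] at hall
    obtain ⟨q, hqual, hloop⟩ := pvALoop_eq address gs none hall
    simp only [hqual, hloop]
    cases pvScan address q with
    | some g => rfl
    | none =>
      cases q with
      | nil => rfl
      | cons a l =>
        simp [List.isEmpty, PySem.List.pyGet?_neg_one, List.getLast?_cons]
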